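-- pv_equiv track=rewrite | github.com/CKG-Uzi/DivRep | examples/graphto9gird.py | determine_cell
-- ===== SOURCE A (Python) =====
-- def determine_cell(direction_relations):
--
--     front = any(r in ["inDFrontOf", "inSFrontOf"] for r in direction_relations)
--     rear = any(r in ["atDRearOf", "atSRearOf"] for r in direction_relations)
--
--     left = "toLeftOf" in direction_relations
--     right = "toRightOf" in direction_relations
--
--     if front and left:
--         return "front_left"
--
--     if front and right:
--         return "front_right"
--
--     if rear and left:
--         return "rear_left"
--
--     if rear and right:
--         return "rear_right"
--
--     if front:
--         return "front"
--
--     if rear: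
--         return "rear"
--
--     if left:
--         return "left"
--
--     if right:
--         return "right"
--
--     return "front"
-- ===== SOURCE B (Python) =====
-- _ROW = {"inDFrontOf": 0, "inSFrontOf": 0, "atDRearOf": 1, "atSRearOf": 1}
-- _COL = {"toLeftOf": 0, "toRightOf": 1}
-- _TABLE = [
--     ["front_left", "front_right", "front"],
--     ["rear_left", "rear_right", "rear"],
--     ["left", "right", "front"],
-- ]
--
-- def determine_cell(direction_relations):
--     row = col = 2
--     for r in direction_relations:
--         row = min(row, _ROW.get(r, 2))
--         col = min(col, _COL.get(r, 2))
--     return _TABLE[row][col]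
-- ===== Notes on version B (the rewrite author's own statement) =====
-- stated objective: alternative
-- what changed: B makes one pass that maps each relation to numeric (row, col) codes, folds them with min (min realizes the front-over-rear / left-over-right priority), and returns a 3x3 lookup-table entry, replacing A's four membership scans and nine-branch if-chain.
import Mathlib
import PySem

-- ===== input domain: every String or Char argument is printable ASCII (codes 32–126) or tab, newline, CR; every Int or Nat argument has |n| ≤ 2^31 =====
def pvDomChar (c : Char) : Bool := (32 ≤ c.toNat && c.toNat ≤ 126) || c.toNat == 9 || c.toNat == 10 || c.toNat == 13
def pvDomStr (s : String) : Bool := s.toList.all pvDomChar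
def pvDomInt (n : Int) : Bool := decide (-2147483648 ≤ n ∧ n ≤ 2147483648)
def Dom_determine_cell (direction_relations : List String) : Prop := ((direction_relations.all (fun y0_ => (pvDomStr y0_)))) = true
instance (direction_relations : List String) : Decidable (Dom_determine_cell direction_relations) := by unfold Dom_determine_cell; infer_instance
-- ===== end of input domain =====

-- B replaces A's four membership scans and nine-branch if-chain by a single pass that
-- min-folds numeric (row, col) codes per relation and indexes a 3x3 label table.

-- ===== PORT A =====
def determine_cell (direction_relations : List String) : String :=
  let front := direction_relations.any (fun r => ["inDFrontOf", "inSFrontOf"].contains r)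
  let rear := direction_relations.any (fun r => ["atDRearOf", "atSRearOf"].contains r)
  let left := direction_relations.contains "toLeftOf"
  let right := direction_relations.contains "toRightOf"
  if front && left then "front_left"
  else if front && right then "front_right"
  else if rear && left then "rear_left"
  else if rear && right then "rear_right"
  else if front then "front"
  else if rear then "rear"
  else if left then "left"
  else if right then "right"
  else "front"

-- ===== PORT B =====
-- _ROW.get(r, 2): the dict has exactly four keys, so the lookup-with-default is this match.
def pvRowCode (r : String) : Nat :=
  if r = "inDFrontOf" then 0 else if r = "inSFrontOf" then 0
  else if r = "atDRearOf" then 1 else if r = "atSRearOf" then 1 else 2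

-- _COL.get(r, 2)
def pvColCode (r : String) : Nat :=
  if r = "toLeftOf" then 0 else if r = "toRightOf" then 1 else 2

-- _TABLE[row][col]; row, col are always in {0, 1, 2} (the fold starts at 2 and only mins)
def pvTable (row col : Nat) : String :=
  match row, col with
  | 0, 0 => "front_left"  | 0, 1 => "front_right" | 0, _ => "front"
  | 1, 0 => "rear_left"   | 1, 1 => "rear_right"  | 1, _ => "rear"
  | _, 0 => "left"        | _, 1 => "right"       | _, _ => "front"

def determine_cell_alt (direction_relations : List String) : String :=
  let rc := direction_relations.foldl
    (fun (st : Nat × Nat) r => (min st.1 (pvRowCode r), min st.2 (pvColCode r))) (2, 2)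
  pvTable rc.1 rc.2

-- ===== PRECONDITION & SPEC =====
def Spec_determine_cell (direction_relations : List String) (out : String) : Prop := out = determine_cell_alt direction_relations
instance (direction_relations : List String) (out : String) : Decidable (Spec_determine_cell direction_relations out) := by unfold Spec_determine_cell; infer_instance

-- ===== CLAIM =====
def Claim_equal_determine_cell : Prop := ∀ (direction_relations : List String), Dom_determine_cell direction_relations → Spec_determine_cell direction_relations (determine_cell direction_relations)

-- ===== LEMMAS AND PROOFS =====

-- The pair-fold splits into two independent min-folds.
theorem fold_pair_split (l : List String) (a b : Nat) :
    l.foldl (fun (st : Nat × Nat) r => (min st.1 (pvRowCode r), min st.2 (pvColCode r))) (a, b)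
      = (l.foldl (fun x r => min x (pvRowCode r)) a, l.foldl (fun x r => min x (pvColCode r)) b) := by
  induction l generalizing a b with
  | nil => rfl
  | cons h t ih => simp [List.foldl, ih]

-- The row min-fold computes min of the start with the best (smallest) row code present.
theorem row_fold_char (l : List String) (a : Nat) (ha : a ≤ 2) :
    l.foldl (fun x r => min x (pvRowCode r)) a
      = min a (if l.any (fun r => r = "inDFrontOf" ∨ r = "inSFrontOf") then 0
               else if l.any (fun r => r = "atDRearOf" ∨ r = "atSRearOf") then 1 else 2) := by
  induction l generalizing a with
  | nil => simp; omega
  | cons h t ih =>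
    have hc : min a (pvRowCode h) ≤ 2 := by unfold pvRowCode; split_ifs <;> omega
    simp only [List.foldl, List.any_cons, ih _ hc]
    unfold pvRowCode
    by_cases h1 : h = "inDFrontOf" <;> by_cases h2 : h = "inSFrontOf" <;>
      by_cases h3 : h = "atDRearOf" <;> by_cases h4 : h = "atSRearOf" <;>
      simp [h1, h2, h3, h4] <;> split_ifs <;> omega

-- The col min-fold likewise.
theorem col_fold_char (l : List String) (a : Nat) (ha : a ≤ 2) :
    l.foldl (fun x r => min x (pvColCode r)) a
      = min a (if l.any (fun r => r = "toLeftOf") then 0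
               else if l.any (fun r => r = "toRightOf") then 1 else 2) := by
  induction l generalizing a with
  | nil => simp; omega
  | cons h t ih =>
    have hc : min a (pvColCode h) ≤ 2 := by unfold pvColCode; split_ifs <;> omega
    simp only [List.foldl, List.any_cons, ih _ hc]
    unfold pvColCode
    by_cases h1 : h = "toLeftOf" <;> by_cases h2 : h = "toRightOf" <;>
      simp [h1, h2] <;> split_ifs <;> omega

-- Python's 'x in list' as List.any of an equality test.
theorem contains_eq_any (dr : List String) (x : String) :
    dr.contains x = dr.any (fun r => r = x) := by
  induction dr with
  | nil => rfl
  | cons h t ih =>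
    simp only [List.contains_cons, List.any_cons, ih]
    have hb : (x == h) = decide (h = x) := by
      by_cases h9 : x = h
      · subst h9; simp
      · have h10 : ¬ (h = x) := fun e => h9 e.symm
        simp [h9, h10]
    rw [hb]

-- ===== VERDICT =====
theorem determine_cell_spec : Claim_equal_determine_cell := by
  intro dr _
  unfold Spec_determine_cell determine_cell determine_cell_alt
  rw [fold_pair_split, row_fold_char _ _ (by omega), col_fold_char _ _ (by omega)]
  have hf : dr.any (fun r => ["inDFrontOf", "inSFrontOf"].contains r)
      = dr.any (fun r => r = "inDFrontOf" ∨ r = "inSFrontOf") := by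
    simp
  have hr : dr.any (fun r => ["atDRearOf", "atSRearOf"].contains r)
      = dr.any (fun r => r = "atDRearOf" ∨ r = "atSRearOf") := by
    simp
  have hl := contains_eq_any dr "toLeftOf"
  have hri := contains_eq_any dr "toRightOf"
  rw [hf, hr, hl, hri]
  cases dr.any (fun r => r = "inDFrontOf" ∨ r = "inSFrontOf") <;>
    cases dr.any (fun r => r = "atDRearOf" ∨ r = "atSRearOf") <;>
    cases dr.any (fun r => r = "toLeftOf") <;>
    cases dr.any (fun r => r = "toRightOf") <;> rfl
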